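-- pv_equiv track=rewrite | github.com/romankurnovskii/leetcode-apps | solutions/3686/01.py | countStableSubsequences
-- ===== SOURCE A (Python) =====
-- from typing import List
--
-- def countStableSubsequences(nums: List[int]) -> int:
--     n = len(nums)
--     res = 0
--
--     for i in range(n):
--         for j in range(i, n):
--             subarray = nums[i : j + 1]
--             if len(set(subarray)) == 1:
--                 res += 1
--
--     return res
-- ===== SOURCE B (Python) =====
-- def countStableSubsequences(nums):
--     total = 0
--     run = 0
--     prev = None
--     for x in nums:
--         if run > 0 and prev == x:
--             run += 1
--         else:
--             run = 1
--         prev = x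
--         total += run
--     return total
-- ===== Notes on version B (the rewrite author's own statement) =====
-- stated objective: faster
-- what changed: Replaced the O(n^3) triple scan (all (i,j) pairs, building a set of each slice) by a single left-to-right pass that maintains the length of the current run of equal elements and adds it at each position.
import Mathlib
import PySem

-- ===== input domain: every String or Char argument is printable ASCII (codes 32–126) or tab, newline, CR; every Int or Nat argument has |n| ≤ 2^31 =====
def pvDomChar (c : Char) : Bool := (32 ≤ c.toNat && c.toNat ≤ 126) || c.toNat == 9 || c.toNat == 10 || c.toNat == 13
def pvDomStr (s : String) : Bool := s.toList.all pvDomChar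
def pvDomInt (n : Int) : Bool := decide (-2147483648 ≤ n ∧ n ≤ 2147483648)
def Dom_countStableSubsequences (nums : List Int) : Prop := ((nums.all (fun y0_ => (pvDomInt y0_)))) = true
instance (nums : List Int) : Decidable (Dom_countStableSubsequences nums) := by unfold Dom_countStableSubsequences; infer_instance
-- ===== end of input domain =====

-- B replaces A's triple scan over all (i,j) slices with a single left-to-right pass maintaining the current equal-run length (objective: faster).


-- ===== PORT A =====
def countStableSubsequences (nums : List Int) : Int :=
  let n : Int := nums.length
  (PySem.List.pyRange 0 n 1).foldl (fun res i =>
    (PySem.List.pyRange i n 1).foldl (fun res j =>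
      let subarray := PySem.List.slice nums (some i) (some (j + 1))
      if (PySem.Set.ofList subarray).length == 1 then res + 1 else res) res) 0

-- ===== PORT B =====
-- state = (total, run, prev); for each x: run = run+1 if it extends the run else 1, total += run
def countStableSubsequences_alt (nums : List Int) : Int :=
  (nums.foldl (fun (s : Int × Int × Option Int) x =>
      let run : Int := if s.2.1 > 0 && s.2.2 == some x then s.2.1 + 1 else 1
      (s.1 + run, run, some x)) ((0 : Int), (0 : Int), (none : Option Int))).1

-- ===== PRECONDITION & SPEC =====
def Spec_countStableSubsequences (nums : List Int) (out : Int) : Prop := out = countStableSubsequences_alt nums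
instance (nums : List Int) (out : Int) : Decidable (Spec_countStableSubsequences nums out) := by unfold Spec_countStableSubsequences; infer_instance

-- ===== CLAIM (what is proved, stated in full; the proofs are below) =====
def Claim_equal_countStableSubsequences : Prop := ∀ (nums : List Int), Dom_countStableSubsequences nums → Spec_countStableSubsequences nums (countStableSubsequences nums)

-- ===== LEMMAS AND PROOFS =====

-- canonical count: for each start position, 1 + the length of the equal run continuing it
def pvS : List Int → Int
  | [] => 0
  | x :: xs => 1 + ((xs.takeWhile (fun y => y == x)).length : Int) + pvS xs

-- B's state-transition count, seeded with run r and previous element p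
def pvC (r : Int) (p : Option Int) : List Int → Int
  | [] => 0
  | x :: xs =>
    let run : Int := if r > 0 && p == some x then r + 1 else 1
    run + pvC run (some x) xs

lemma pvC_shift (xs : List Int) : ∀ (x : Int) (r : Int), 0 ≤ r →
    pvC r (some x) xs = pvC 0 none xs + r * ((xs.takeWhile (fun y => y == x)).length : Int) := by
  induction xs with
  | nil => intro x r _; simp [pvC]
  | cons y ys ih =>
    intro x r hr
    by_cases hxy : x = y
    · subst hxy
      have hrun : (if ((r > 0 : Bool) && ((some x : Option Int) == some x)) = true then r + 1 else 1) = r + 1 := by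
        rcases lt_or_eq_of_le hr with h | h
        · simp [h]
        · simp [← h]
      show (if ((r > 0 : Bool) && ((some x : Option Int) == some x)) = true then r + 1 else 1)
          + pvC (if ((r > 0 : Bool) && ((some x : Option Int) == some x)) = true then r + 1 else 1) (some x) ys = _
      rw [hrun, ih x (r+1) (by omega)]
      have h0 : pvC 0 none (x :: ys) = 1 + pvC 1 (some x) ys := by simp [pvC]
      rw [h0, ih x 1 (by omega)]
      simp only [List.takeWhile_cons, beq_self_eq_true, if_true, List.length_cons]
      push_cast
      ring
    · have hxy' : ((some x : Option Int) == some y) = false := by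
        simp only [beq_eq_false_iff_ne, ne_eq, Option.some.injEq]
        exact fun h => hxy h
      have htw : ((y :: ys).takeWhile (fun z => z == x)) = [] := by
        simp only [List.takeWhile_cons, beq_iff_eq]
        rw [if_neg (by exact fun h => hxy h.symm)]
      show (if ((r > 0 : Bool) && ((some x : Option Int) == some y)) = true then r + 1 else 1)
          + pvC (if ((r > 0 : Bool) && ((some x : Option Int) == some y)) = true then r + 1 else 1) (some y) ys = _
      rw [hxy']
      simp [pvC, htw]

lemma pvS_eq_pvC (l : List Int) : pvS l = pvC 0 none l := by
  induction l with
  | nil => rfl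
  | cons x xs ih =>
    have h0 : pvC 0 none (x :: xs) = 1 + pvC 1 (some x) xs := by simp [pvC]
    rw [pvS, h0, pvC_shift xs x 1 (by omega), ih]
    ring

lemma B_fold (l : List Int) : ∀ (t r : Int) (p : Option Int),
    (l.foldl (fun (s : Int × Int × Option Int) x =>
      let run : Int := if s.2.1 > 0 && s.2.2 == some x then s.2.1 + 1 else 1
      (s.1 + run, run, some x)) (t, r, p)).1 = t + pvC r p l := by
  induction l with
  | nil => intro t r p; simp [pvC]
  | cons x xs ih =>
    intro t r p
    simp only [List.foldl_cons, pvC]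
    rw [ih]
    ring

lemma B_eq_pvS (nums : List Int) : countStableSubsequences_alt nums = pvS nums := by
  rw [countStableSubsequences_alt, B_fold, pvS_eq_pvC]; ring

-- A as a sum of per-start counts
lemma A_sum (nums : List Int) :
    countStableSubsequences nums =
      ((PySem.List.pyRange 0 (nums.length : Int) 1).map (fun i =>
        (((PySem.List.pyRange i (nums.length : Int) 1).countP (fun j =>
          (PySem.Set.ofList (PySem.List.slice nums (some i) (some (j + 1)))).length == 1)) : Int))).sum := by
  unfold countStableSubsequences
  have h : ∀ (res i : Int),
      (PySem.List.pyRange i (nums.length : Int) 1).foldl (fun res j =>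
        let subarray := PySem.List.slice nums (some i) (some (j + 1))
        if (PySem.Set.ofList subarray).length == 1 then res + 1 else res) res
      = res + (((PySem.List.pyRange i (nums.length : Int) 1).countP (fun j =>
          (PySem.Set.ofList (PySem.List.slice nums (some i) (some (j + 1)))).length == 1)) : Int) := by
    intro res i
    exact PySem.List.foldl_if_add_one _ _ _
  simp only [h]
  rw [PySem.List.foldl_add]
  simp

lemma nodup_all_eq {x : Int} {L : List Int} (hnd : L.Nodup) (hall : ∀ y ∈ L, y = x)
    (hx : x ∈ L) : L = [x] := by
  cases L with
  | nil => cases hx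
  | cons y t =>
    have hy : y = x := hall y (by simp)
    subst hy
    rcases t with _ | ⟨z, t'⟩
    · rfl
    · exfalso
      have hz : z = y := hall z (by simp)
      subst hz
      simp at hnd

lemma setlen_one (x : Int) (s : List Int) :
    ((PySem.Set.ofList (x :: s)).length = 1) ↔ ∀ y ∈ s, y = x := by
  constructor
  · intro h y hy
    rcases List.length_eq_one_iff.mp h with ⟨z, hz⟩
    have hxz : x ∈ PySem.Set.ofList (x :: s) := by
      rw [PySem.Set.mem_ofList]; simp
    have hyz : y ∈ PySem.Set.ofList (x :: s) := by
      rw [PySem.Set.mem_ofList]; simp [hy]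
    rw [hz] at hxz hyz
    simp at hxz hyz
    rw [hxz]; exact hyz
  · intro h
    have := nodup_all_eq (x := x) (L := PySem.Set.ofList (x :: s)) (PySem.Set.nodup_ofList _)
      (by intro y hy; rw [PySem.Set.mem_ofList] at hy; rcases List.mem_cons.mp hy with h1 | h1; exacts [h1, h y h1])
      (by rw [PySem.Set.mem_ofList]; simp)
    rw [this]; rfl

lemma prefix_all_iff (x : Int) : ∀ (t : List Int) (k : Nat), k ≤ t.length →
    ((∀ y ∈ t.take k, y = x) ↔ k ≤ (t.takeWhile (fun y => y == x)).length) := by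
  intro t
  induction t with
  | nil => intro k hk; simp_all
  | cons z t' ih =>
    intro k hk
    cases k with
    | zero => simp
    | succ k' =>
      simp only [List.take_succ_cons, List.takeWhile_cons, List.mem_cons]
      by_cases hz : z = x
      · subst hz
        simp only [beq_self_eq_true, if_true, List.length_cons]
        rw [Nat.succ_le_succ_iff]
        rw [← ih k' (by simpa using hk)]
        constructor
        · intro h y hy; exact h y (Or.inr hy)
        · intro h y hy; rcases hy with h1 | h1; exact h1; exact h y h1
      · have : (z == x) = false := by simp [hz]
        simp only [this]
        constructor
        · intro h; exact absurd (h z (Or.inl rfl)) hz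
        · intro h; simp at h

lemma countRange (w : Nat) : ∀ (n : Nat), (List.range n).countP (fun k => decide (k ≤ w)) = min (w + 1) n := by
  intro n
  induction n with
  | zero => simp
  | succ m ih =>
    rw [List.range_succ, List.countP_append, ih]
    by_cases h : m ≤ w <;> simp [h] <;> omega

-- the inner count for start i is 1 + the run length of drop i
lemma inner_eq (nums : List Int) (i : Nat) (x : Int) (t : List Int)
    (hd : nums.drop i = x :: t) :
    ((PySem.List.pyRange (i : Int) (nums.length : Int) 1).countP (fun j =>
      (PySem.Set.ofList (PySem.List.slice nums (some (i : Int)) (some (j + 1)))).length == 1))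
    = (t.takeWhile (fun y => y == x)).length + 1 := by
  have hlen : nums.length - i = t.length + 1 := by
    have := congrArg List.length hd
    simp at this; omega
  rw [PySem.List.pyRange_one, List.countP_map]
  have htoNat : ((nums.length : Int) - (i : Int)).toNat = t.length + 1 := by omega
  rw [htoNat]
  have hcong : ∀ k ∈ List.range (t.length + 1),
      ((fun j => (PySem.Set.ofList (PySem.List.slice nums (some (i : Int)) (some (j + 1)))).length == 1) ∘
        (fun k : Nat => (i : Int) + k)) k = decide (k ≤ (t.takeWhile (fun y => y == x)).length) := by
    intro k hk
    have hk' : k ≤ t.length := by simpa using Nat.lt_succ_iff.mp (List.mem_range.mp hk)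
    have hslice : PySem.List.slice nums (some (i : Int)) (some ((i : Int) + (k : Int) + 1)) =
        x :: t.take k := by
      have : (i : Int) + (k : Int) + 1 = (i : Int) + ((k + 1 : Nat) : Int) := by push_cast; ring
      rw [this, PySem.List.slice_natCast_add, hd]
      simp
    simp only [Function.comp_apply, hslice]
    by_cases hc : ∀ y ∈ t.take k, y = x
    · have h1 := (setlen_one x (t.take k)).mpr hc
      have h2 := (prefix_all_iff x t k hk').mp hc
      simp [h1, h2]
    · have h1 : ¬ ((PySem.Set.ofList (x :: t.take k)).length = 1) := fun h => hc ((setlen_one _ _).mp h)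
      have h2 : ¬ (k ≤ (t.takeWhile (fun y => y == x)).length) := fun h => hc ((prefix_all_iff x t k hk').mpr h)
      simp [h2]
      omega
  rw [List.countP_congr (fun k hk => by rw [hcong k hk]), countRange]
  have : (t.takeWhile (fun y => y == x)).length ≤ t.length := List.Sublist.length_le (List.takeWhile_sublist _)
  omega

def pvHead : List Int → Int
  | [] => 0
  | x :: t => ((t.takeWhile (fun y => y == x)).length : Int) + 1

lemma sum_starts : ∀ (l : List Int),
    ((List.range l.length).map (fun i => pvHead (l.drop i))).sum = pvS l := by
  intro l
  induction l with
  | nil => simp [pvS]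
  | cons x xs ih =>
    rw [List.length_cons, List.range_succ_eq_map, List.map_cons, List.map_map]
    have : ((fun i => pvHead ((x :: xs).drop i)) ∘ Nat.succ) = fun i => pvHead (xs.drop i) := by
      funext i; simp
    rw [this, List.sum_cons, ih]
    simp [pvHead, pvS]
    ring

lemma A_eq_pvS (nums : List Int) : countStableSubsequences nums = pvS nums := by
  rw [A_sum, PySem.List.pyRange_zero_natCast, List.map_map, ← sum_starts]
  congr 1
  apply List.map_congr_left
  intro k hk
  have hk' : k < nums.length := List.mem_range.mp hk
  have hne : nums.drop k ≠ [] := by simp [hk']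
  rcases h : nums.drop k with _ | ⟨x, t⟩
  · exact absurd h hne
  · simp only [Function.comp_apply, pvHead]
    rw [inner_eq nums k x t h]
    push_cast
    ring

-- ===== VERDICT (by name: the statement is the Claim_ definition above) =====
theorem countStableSubsequences_spec : Claim_equal_countStableSubsequences := by
  intro nums _
  show countStableSubsequences nums = countStableSubsequences_alt nums
  rw [A_eq_pvS, B_eq_pvS]
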